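-- pv_equiv track=rewrite | github.com/irenepatsoura/project_458 | aes_timing_analysis.py | _simulate_cache_latency
-- ===== SOURCE A (Python) =====
-- def _simulate_cache_latency(byte_val):
--     """
--     Simulates the timing difference of a Cache Miss vs Cache Hit.
--     In a real 'unsafe' C implementation, accessing specific indices
--     takes longer depending on if they are already in the CPU Cache.
--     """
--     # Simulate: Indices 0-15 are "Hot" (Cached) -> Fast
--     # Indices 200-255 are "Cold" (Uncached) -> Slower
--     # This creates the 'leak' we want to detect.
--     dummy = 0
--     if byte_val > 200:
--         # Simulated Cache Miss (Slower)
--         for x in range(100): dummy += x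
--     elif byte_val == 0:
--         # Simulated Zero-handling special path (Very slow)
--         for x in range(150): dummy += x
--     else:
--         # Simulated Cache Hit (Fast)
--         for x in range(10): dummy += x
--     return dummy
-- ===== SOURCE B (Python) =====
-- def _simulate_cache_latency(byte_val):
--     """Same dispatch on byte_val, but each branch uses the closed-form
--     triangular sum n*(n-1)//2 instead of a busy accumulation loop."""
--     if byte_val > 200:
--         n = 100
--     elif byte_val == 0:
--         n = 150
--     else:
--         n = 10
--     return n * (n - 1) // 2
-- ===== Notes on version B (the rewrite author's own statement) =====
-- stated objective: simpler
-- what changed: Each branch's busy accumulation loop over range(n) is replaced by the closed-form triangular sum n*(n-1)//2.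
import Mathlib
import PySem

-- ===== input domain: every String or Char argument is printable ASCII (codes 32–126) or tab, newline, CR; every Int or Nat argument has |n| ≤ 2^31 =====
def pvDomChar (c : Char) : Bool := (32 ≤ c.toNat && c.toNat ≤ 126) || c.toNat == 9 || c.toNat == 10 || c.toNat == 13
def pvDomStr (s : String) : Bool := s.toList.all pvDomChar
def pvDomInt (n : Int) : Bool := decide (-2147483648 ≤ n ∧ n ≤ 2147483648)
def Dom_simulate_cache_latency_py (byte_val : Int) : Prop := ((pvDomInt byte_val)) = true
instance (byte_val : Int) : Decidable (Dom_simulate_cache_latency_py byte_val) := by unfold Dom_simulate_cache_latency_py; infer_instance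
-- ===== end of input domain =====

-- ===== PORT A =====
-- A: busy-loop accumulation, transliterated as a fold over range
def simulate_cache_latency_py (byte_val : Int) : Int :=
  if byte_val > 200 then
    (PySem.List.pyRange 0 100 1).foldl (fun dummy x => dummy + x) 0
  else if byte_val == 0 then
    (PySem.List.pyRange 0 150 1).foldl (fun dummy x => dummy + x) 0
  else
    (PySem.List.pyRange 0 10 1).foldl (fun dummy x => dummy + x) 0

-- ===== PORT B =====
-- B: same dispatch, closed-form triangular sum n*(n-1)//2 (simpler, O(1))
def simulate_cache_latency_py_alt (byte_val : Int) : Int :=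
  let n : Int := if byte_val > 200 then 100 else if byte_val == 0 then 150 else 10
  PySem.Int.floordiv (n * (n - 1)) 2

-- ===== PRECONDITION & SPEC =====
def Spec_simulate_cache_latency_py (byte_val : Int) (out : Int) : Prop := out = simulate_cache_latency_py_alt byte_val
instance (byte_val : Int) (out : Int) : Decidable (Spec_simulate_cache_latency_py byte_val out) := by unfold Spec_simulate_cache_latency_py; infer_instance

-- ===== CLAIM (what is proved, stated in full; the proofs are below) =====
def Claim_equal_simulate_cache_latency_py : Prop := ∀ (byte_val : Int), Dom_simulate_cache_latency_py byte_val → Spec_simulate_cache_latency_py byte_val (simulate_cache_latency_py byte_val)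

-- ===== LEMMAS AND PROOFS =====

-- ===== VERDICT (by name: the statement is the Claim_ definition above) =====
set_option maxRecDepth 4000 in
theorem simulate_cache_latency_py_spec : Claim_equal_simulate_cache_latency_py := by
  intro byte_val _
  unfold Spec_simulate_cache_latency_py simulate_cache_latency_py simulate_cache_latency_py_alt
  by_cases h1 : byte_val > 200 <;> by_cases h2 : byte_val == 0 <;>
    simp [h1, h2] <;> decide
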